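-- pv_equiv track=rewrite | github.com/VaHiX/CodeForces | Python/ByTier/E/1926_E_Vlad_and_an_Odd_Ordering.py | MainProg
-- ===== SOURCE A (Python) =====
-- def MainProg(n, k):
--     # Calculate number of odd numbers from 1 to n
--     odd = (n + 1) // 2
--     # If k is within the range of odd numbers, return the k-th odd number
--     if k <= odd:
--         return 2 * k - 1
--     k -= odd  # Adjust k to account for odd numbers already processed
--
--     num = 2  # Start with 2 (which is 2 * 1, i.e. 2 times an odd number)
--     while k > 0:
--         # Count how many numbers in range [1,n] that are multiples of 'num'
--         # but not multiples of 'num * 2'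
--         m = n // num - n // (num * 2)
--         # If k is within this group, return the appropriate number
--         if k <= m:
--             return num * (2 * k - 1)
--         k -= m  # Reduce k by the count of numbers in this group
--         num *= 2  # Move to next multiple (2*2, 2*4, etc.)
--     return -1
-- ===== SOURCE B (Python) =====
-- def MainProg(n, k):
--     # Self-similarity: the sequence for n is the odds 1,3,...,
--     # followed by 2 * (the sequence for n // 2).
--     odd = (n + 1) // 2
--     if k <= odd:
--         return 2 * k - 1
--     return 2 * MainProg(n // 2, k - odd)
-- ===== Notes on version B (the rewrite author's own statement) =====
-- stated objective: simpler
-- what changed: B discards A's iterative tier scan with running state (k, num) and its separate odds case: it is a two-line self-similar recursion using the fact that the ordering for n is the odds followed by 2 times the ordering for n//2.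
import Mathlib
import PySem

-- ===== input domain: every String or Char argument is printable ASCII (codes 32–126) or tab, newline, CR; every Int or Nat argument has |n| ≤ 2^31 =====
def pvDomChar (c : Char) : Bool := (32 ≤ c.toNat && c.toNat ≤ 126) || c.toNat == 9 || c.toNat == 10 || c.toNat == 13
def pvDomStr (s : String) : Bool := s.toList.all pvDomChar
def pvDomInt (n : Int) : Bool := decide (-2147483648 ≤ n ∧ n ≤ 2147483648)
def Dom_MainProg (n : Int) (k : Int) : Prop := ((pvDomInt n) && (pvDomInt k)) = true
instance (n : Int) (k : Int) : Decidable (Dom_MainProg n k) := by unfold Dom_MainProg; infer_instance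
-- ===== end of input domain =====

-- B replaces A's iterative tier scan (state k, num = 2, 4, 8, …) with a two-line
-- self-similar recursion: the sequence for n is the odds, then 2 × the sequence for n // 2 (simpler).

-- ===== PORT A =====
-- A's while loop (state k, num); fuel bounds the iterations, -1 on exhaustion is
-- unreachable under Pre_MainProg (the loop returns within ~log2 n iterations there).
def MainProgLoopA (n : Int) : Nat → Int → Int → Int
  | 0, _, _ => -1
  | fuel + 1, k, num =>
    if k > 0 then
      let m := PySem.Int.floordiv n num - PySem.Int.floordiv n (num * 2)
      if k ≤ m then num * (2 * k - 1)
      else MainProgLoopA n fuel (k - m) (num * 2)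
    else -1

def MainProg (n : Int) (k : Int) : Int :=
  let odd := PySem.Int.floordiv (n + 1) 2
  if k ≤ odd then 2 * k - 1
  else MainProgLoopA n (n.toNat + 1) (k - odd) 2

-- ===== PORT B =====
-- B's recursion; fuel bounds the depth, -1 on exhaustion is unreachable under
-- Pre_MainProg (the recursion returns within ~log2 n levels there).
def MainProgRecB : Nat → Int → Int → Int
  | 0, _, _ => -1
  | fuel + 1, n, k =>
    let odd := PySem.Int.floordiv (n + 1) 2
    if k ≤ odd then 2 * k - 1
    else 2 * MainProgRecB fuel (PySem.Int.floordiv n 2) (k - odd)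

def MainProg_alt (n : Int) (k : Int) : Int :=
  MainProgRecB (n.toNat + 1) n k

-- ===== PRECONDITION & SPEC =====
-- Pre_ is exactly where the Python A terminates: for k beyond the k-th-element range
-- (k > n with n ≥ 1, or k > (n+1)//2 with n ≤ 0) A's while loop never exits.
def Pre_MainProg (n : Int) (k : Int) : Prop :=
  k ≤ PySem.Int.floordiv (n + 1) 2 ∨ (1 ≤ n ∧ k ≤ n)
instance (n : Int) (k : Int) : Decidable (Pre_MainProg n k) := by unfold Pre_MainProg; infer_instance
def pvWitness_MainProg : Int × Int := (10, 7)

def Spec_MainProg (n : Int) (k : Int) (out : Int) : Prop := out = MainProg_alt n k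
instance (n : Int) (k : Int) (out : Int) : Decidable (Spec_MainProg n k out) := by unfold Spec_MainProg; infer_instance

-- ===== CLAIM (what is proved, stated in full; the proofs are below) =====
def Claim_equal_MainProg : Prop := ∀ (n : Int) (k : Int), Dom_MainProg n k → Pre_MainProg n k → Spec_MainProg n k (MainProg n k)

-- ===== LEMMAS AND PROOFS =====

-- floor division by positive divisors composes: n // num // 2 = n // (num*2)
lemma pvFloordiv_comp (n num : Int) (h : 0 < num) :
    PySem.Int.floordiv (PySem.Int.floordiv n num) 2 = PySem.Int.floordiv n (num * 2) := by
  rw [PySem.Int.floordiv_eq_ediv_of_pos h, PySem.Int.floordiv_eq_ediv_of_pos (by norm_num),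
      PySem.Int.floordiv_eq_ediv_of_pos (by positivity)]
  exact Int.ediv_ediv_of_nonneg (le_of_lt h)

-- A's loop entered with divisor num computes num * (B's recursion on n // num),
-- provided both sides have enough fuel to finish.
lemma pvLoopA_eq_recB : ∀ (fuel fuel' : Nat) (n k num : Int), 0 < num → 1 ≤ k →
    k ≤ PySem.Int.floordiv n num →
    PySem.Int.floordiv n num < 2 ^ fuel → PySem.Int.floordiv n num < 2 ^ fuel' →
    MainProgLoopA n fuel k num = num * MainProgRecB fuel' (PySem.Int.floordiv n num) k := by
  intro fuel
  induction fuel with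
  | zero =>
    intro fuel' n k num hnum hk hkle hb _
    exfalso; omega
  | succ fuel ih =>
    intro fuel' n k num hnum hk hkle hb hb'
    match fuel' with
    | 0 => exfalso; exact absurd hb' (by omega)
    | fuel' + 1 =>
      set m' := PySem.Int.floordiv n num with hm'
      have hcomp : PySem.Int.floordiv n (num * 2) = PySem.Int.floordiv m' 2 :=
        (pvFloordiv_comp n num hnum).symm
      have hm'2 : PySem.Int.floordiv m' 2 = m' / 2 :=
        PySem.Int.floordiv_eq_ediv_of_pos (by norm_num)
      have hodd : PySem.Int.floordiv (m' + 1) 2 = m' - m' / 2 := by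
        rw [PySem.Int.floordiv_eq_ediv_of_pos (by norm_num : (0:Int) < 2)]; omega
      rw [MainProgLoopA, MainProgRecB, if_pos (by omega : k > 0)]
      simp only [← hm', hcomp, hm'2, hodd]
      by_cases hc : k ≤ m' - m' / 2
      · rw [if_pos hc, if_pos hc]
      · rw [if_neg hc, if_neg hc]
        have hrec := ih fuel' n (k - (m' - m' / 2)) (num * 2) (by positivity) (by omega)
          (by rw [hcomp, hm'2]; omega)
          (by rw [hcomp, hm'2]; have : (2:Int) ^ (fuel + 1) = 2 ^ fuel * 2 := by ring
              omega)
          (by rw [hcomp, hm'2]; have : (2:Int) ^ (fuel' + 1) = 2 ^ fuel' * 2 := by ring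
              omega)
        rw [hrec, hcomp, hm'2]; ring

lemma pvInt_lt_two_pow_toNat (n : Int) : n < 2 ^ n.toNat := by
  calc n ≤ (n.toNat : Int) := Int.self_le_toNat n
  _ < 2 ^ n.toNat := by exact_mod_cast Nat.lt_two_pow_self

theorem MainProg_equal : ∀ (n k : Int), Pre_MainProg n k →
    MainProg n k = MainProg_alt n k := by
  intro n k hpre
  unfold MainProg MainProg_alt
  rw [MainProgRecB]
  by_cases h : k ≤ PySem.Int.floordiv (n + 1) 2
  · simp only [if_pos h]
  · simp only [if_neg h]
    have hn1 : 1 ≤ n ∧ k ≤ n := hpre.resolve_left h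
    have hodd : PySem.Int.floordiv (n + 1) 2 = n - n / 2 := by
      rw [PySem.Int.floordiv_eq_ediv_of_pos (by norm_num : (0:Int) < 2)]; omega
    have hfd2 : PySem.Int.floordiv n 2 = n / 2 :=
      PySem.Int.floordiv_eq_ediv_of_pos (by norm_num)
    have hbound : n / 2 < 2 ^ n.toNat := by
      have := pvInt_lt_two_pow_toNat n; omega
    have hbound' : n / 2 < 2 ^ (n.toNat + 1) := by
      have : (2:Int) ^ (n.toNat + 1) = 2 ^ n.toNat * 2 := by ring
      omega
    have := pvLoopA_eq_recB (n.toNat + 1) n.toNat n (k - PySem.Int.floordiv (n + 1) 2) 2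
      (by norm_num) (by omega)
      (by rw [hfd2, hodd]; omega)
      (by rw [hfd2]; exact hbound') (by rw [hfd2]; exact hbound)
    rw [this, hfd2]

-- ===== VERDICT (by name: the statement is the Claim_ definition above) =====
theorem MainProg_spec : Claim_equal_MainProg := by
  intro n k _ hpre
  exact MainProg_equal n k hpre
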